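-- pv_equiv track=rewrite | github.com/CognitiveComputationLab/ccobra | ccobra/benchmark/comparator/comparator.py | tuple_to_string
-- ===== SOURCE A (Python) =====
-- import copy
--
-- def tuple_to_string(tuptup):
--     """ Converts a tuple to its string representation. Uses different separators (';', '/', '|') for
--     different depths of the representation.
--
--     Parameters
--     ----------
--     tuptup : list
--         Tuple to convert to its string representation.
--
--     Returns
--     -------
--     str
--         String representation of the input tuple.
--
--     """
--
--     def join_deepest(tup, sep=';'):
--         """ Recursive function to create the string representation for the deepest level of the
--         tuptup list.
--
--         Parameters
--         ----------
--         tup : object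
--             Element to join if list or list of lists.
--
--         sep : str, optional
--             Separation character to join the list elements by.
--
--         Returns
--         -------
--         object
--             List containing joined string in max depth. Str if input depth = 1.
--
--         """
--
--         if not isinstance(tup, list):
--             return tup
--         if not isinstance(tup[0], list):
--             return sep.join(tup)
--
--         for idx, val in enumerate(tup):
--             tup[idx] = join_deepest(val, sep)
--         return tup
--
--     tup = copy.deepcopy(tuptup)
--     tup = join_deepest(tup, ';')
--     tup = join_deepest(tup, '/')
--     tup = join_deepest(tup, '|')
--     return tup
-- ===== SOURCE B (Python) =====
-- def tuple_to_string(tuptup):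
--     """String form of a depth-3 nested list: innermost joined by ';', then '/', then '|'."""
--     return '|'.join('/'.join(';'.join(inner) for inner in mid) for mid in tuptup)
-- ===== Notes on version B (the rewrite author's own statement) =====
-- stated objective: simpler
-- what changed: Replaces A's deepcopy plus three mutating bottom-up join_deepest passes with a single non-mutating nested join expression over the fixed depth-3 structure.
import Mathlib
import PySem

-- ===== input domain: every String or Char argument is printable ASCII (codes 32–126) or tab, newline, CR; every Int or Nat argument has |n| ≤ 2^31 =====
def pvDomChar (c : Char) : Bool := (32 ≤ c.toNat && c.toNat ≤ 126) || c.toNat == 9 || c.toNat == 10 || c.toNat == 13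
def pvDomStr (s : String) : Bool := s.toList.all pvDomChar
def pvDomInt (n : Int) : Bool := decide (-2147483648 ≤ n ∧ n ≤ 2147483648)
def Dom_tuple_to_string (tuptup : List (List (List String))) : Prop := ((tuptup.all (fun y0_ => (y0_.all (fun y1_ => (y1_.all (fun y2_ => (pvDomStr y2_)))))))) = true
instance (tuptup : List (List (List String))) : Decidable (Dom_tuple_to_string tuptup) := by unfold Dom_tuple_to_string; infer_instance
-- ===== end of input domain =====

-- B replaces A's deepcopy plus three mutating bottom-up join_deepest passes with one
-- non-mutating nested join expression (objective: simpler). A mutates only its private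
-- deepcopy, so the caller observes no side effect in either version.

-- ===== PORT A =====
-- join_deepest at the innermost level: tup[0] is not a list, so 'return sep.join(tup)'.
-- (the tup[0] probe itself raises IndexError on an empty list — excluded by Pre_ below)
def pvJoinDeepest1 (tup : List String) (sep : String) : String :=
  PySem.Str.join sep tup

-- join_deepest on a list of lists of strings: tup[0] is a list, so the enumerate loop
-- overwrites tup[idx] with join_deepest(val, sep) and returns the (mutated) list.
def pvJoinDeepest2 (tup : List (List String)) (sep : String) : List String :=
  tup.map (fun val => pvJoinDeepest1 val sep)

-- join_deepest on the full depth-3 input: tup[0] is a list, same enumerate loop one level up.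
def pvJoinDeepest3 (tup : List (List (List String))) (sep : String) : List (List String) :=
  tup.map (fun val => pvJoinDeepest2 val sep)

def tuple_to_string (tuptup : List (List (List String))) : String :=
  let tup := tuptup            -- tup = copy.deepcopy(tuptup): identity on immutable Lean lists
  let tup1 := pvJoinDeepest3 tup ";"     -- tup = join_deepest(tup, ';')
  let tup2 := pvJoinDeepest2 tup1 "/"    -- tup = join_deepest(tup, '/')
  pvJoinDeepest1 tup2 "|"                -- tup = join_deepest(tup, '|'); return tup

-- ===== PORT B =====
def tuple_to_string_alt (tuptup : List (List (List String))) : String :=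
  PySem.Str.join "|"
    (tuptup.map (fun mid => PySem.Str.join "/"
      (mid.map (fun inner => PySem.Str.join ";" inner))))

-- ===== PRECONDITION & SPEC =====
-- Pre_ excludes exactly the inputs on which A raises IndexError (tup[0] on an empty list
-- at any level); B returns the join of whatever is present there (e.g. "" on []).
def Pre_tuple_to_string (tuptup : List (List (List String))) : Prop :=
  tuptup ≠ [] ∧ ∀ mid ∈ tuptup, mid ≠ [] ∧ ∀ inner ∈ mid, inner ≠ []
instance (tuptup : List (List (List String))) : Decidable (Pre_tuple_to_string tuptup) := by
  unfold Pre_tuple_to_string; infer_instance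
def pvWitness_tuple_to_string : List (List (List String)) := [[["a", "b"], ["c"]], [["d"]]]


def Spec_tuple_to_string (tuptup : List (List (List String))) (out : String) : Prop := out = tuple_to_string_alt tuptup
instance (tuptup : List (List (List String))) (out : String) : Decidable (Spec_tuple_to_string tuptup out) := by unfold Spec_tuple_to_string; infer_instance

-- ===== CLAIM (what is proved, stated in full; the proofs are below) =====
def Claim_equal_tuple_to_string : Prop := ∀ (tuptup : List (List (List String))), Dom_tuple_to_string tuptup → Pre_tuple_to_string tuptup → Spec_tuple_to_string tuptup (tuple_to_string tuptup)

-- ===== LEMMAS AND PROOFS =====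

-- ===== VERDICT (by name: the statement is the Claim_ definition above) =====
theorem tuple_to_string_spec : Claim_equal_tuple_to_string := by
  intro tuptup _ _
  unfold Spec_tuple_to_string tuple_to_string tuple_to_string_alt
    pvJoinDeepest3 pvJoinDeepest2 pvJoinDeepest1
  simp [List.map_map, Function.comp_def]
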